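-- pv_equiv track=rewrite | github.com/zwoelfgang/launch-school-python | py101/lesson2/rock_paper_scissors.py | map_player_choice
-- ===== SOURCE A (Python) =====
-- VALID_CHOICES = {
--     ('(r)ock', 'r', 'rock'): 'rock',
--     ('(p)aper', 'p', 'paper'): 'paper',
--     ('(sc)issors', 'sc', 'scissors'): 'scissors',
--     ('(sp)ock', 'sp', 'spock'): 'spock',
--     ('(l)izard', 'l', 'lizard'): 'lizard'
-- }
--
-- def map_player_choice(string):
--     idx = 0
--     choice_map = {}
--     choice_key = None
--
--     while idx < len(list(VALID_CHOICES)):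
--         tup = list(VALID_CHOICES)[idx]
--         for item in tup:
--             if item == string:
--                 choice_map[tup] = VALID_CHOICES[tup]
--                 choice_key = tup
--         idx += 1
--
--     return choice_map, choice_key
-- ===== SOURCE B (Python) =====
-- VALID_CHOICES = {
--     ('(r)ock', 'r', 'rock'): 'rock',
--     ('(p)aper', 'p', 'paper'): 'paper',
--     ('(sc)issors', 'sc', 'scissors'): 'scissors',
--     ('(sp)ock', 'sp', 'spock'): 'spock',
--     ('(l)izard', 'l', 'lizard'): 'lizard'
-- }
--
-- _REVERSE = {item: tup for tup in VALID_CHOICES for item in tup}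
--
-- def map_player_choice(string):
--     tup = _REVERSE.get(string)
--     if tup is None:
--         return {}, None
--     return {tup: VALID_CHOICES[tup]}, tup
-- ===== Notes on version B (the rewrite author's own statement) =====
-- stated objective: idiomatic
-- what changed: Replaces A's index-driven while loop with a nested for-scan over the whole table by a reverse-lookup dict (member string -> owning tuple) built once at module level, so the function body is a single dict .get() plus one direct table lookup.
import Mathlib
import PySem

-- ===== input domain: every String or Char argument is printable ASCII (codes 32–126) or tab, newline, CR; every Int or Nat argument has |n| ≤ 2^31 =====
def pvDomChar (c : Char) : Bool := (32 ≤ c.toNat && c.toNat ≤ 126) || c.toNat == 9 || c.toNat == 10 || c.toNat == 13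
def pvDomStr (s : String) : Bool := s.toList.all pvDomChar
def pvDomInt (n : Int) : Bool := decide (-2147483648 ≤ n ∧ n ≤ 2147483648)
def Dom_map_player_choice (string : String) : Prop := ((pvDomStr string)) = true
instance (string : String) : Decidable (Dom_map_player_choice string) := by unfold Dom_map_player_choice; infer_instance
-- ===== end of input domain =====

-- B replaces A's nested scan of the choice table with a reverse-lookup dict built once; objective: idiomatic (no speed claim).

-- the module-level VALID_CHOICES dict, shared context of both versions
def validChoices : PySem.Dict (List String) String := PySem.Dict.ofList
  [ (["(r)ock", "r", "rock"], "rock"),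
    (["(p)aper", "p", "paper"], "paper"),
    (["(sc)issors", "sc", "scissors"], "scissors"),
    (["(sp)ock", "sp", "spock"], "spock"),
    (["(l)izard", "l", "lizard"], "lizard") ]

-- ===== PORT A =====
-- while idx < len(list(VALID_CHOICES)): tup = keys[idx]; for item in tup: if item == string: update dict and key
def map_player_choice (string : String) : (List (List String × String)) × Option (List String) :=
  let st :=
    validChoices.items.foldl
      (fun (st : PySem.Dict (List String) String × Option (List String)) kv =>
        kv.1.foldl
          (fun st2 item =>
            if item == string then (st2.1.insert kv.1 kv.2, some kv.1) else st2)
          st)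
      (PySem.Dict.empty, none)
  (st.1.items, st.2)

-- ===== PORT B =====
-- _REVERSE = {item: tup for tup in VALID_CHOICES for item in tup}
def reverseTable : PySem.Dict String (List String) :=
  validChoices.items.foldl
    (fun d kv => kv.1.foldl (fun d2 item => d2.insert item kv.1) d)
    PySem.Dict.empty

def map_player_choice_alt (string : String) : (List (List String × String)) × Option (List String) :=
  match reverseTable.get? string with
  | none => ([], none)
  | some tup => ([(tup, (validChoices.get? tup).getD "")], some tup)
      -- VALID_CHOICES[tup]: tup always present, so the getD default is never used

-- ===== PRECONDITION & SPEC =====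
def Spec_map_player_choice (string : String) (out : (List (List String × String)) × Option (List String)) : Prop := out = map_player_choice_alt string
instance (string : String) (out : (List (List String × String)) × Option (List String)) : Decidable (Spec_map_player_choice string out) := by unfold Spec_map_player_choice; infer_instance

-- ===== CLAIM (what is proved, stated in full; the proofs are below) =====
def Claim_equal_map_player_choice : Prop := ∀ (string : String), Dom_map_player_choice string → Spec_map_player_choice string (map_player_choice string)

-- ===== LEMMAS AND PROOFS =====
theorem map_player_choice_eq_alt (s : String) : map_player_choice s = map_player_choice_alt s := by
  by_cases h1 : "(r)ock" = s;   · subst h1; decide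
  by_cases h2 : "r" = s;        · subst h2; decide
  by_cases h3 : "rock" = s;     · subst h3; decide
  by_cases h4 : "(p)aper" = s;  · subst h4; decide
  by_cases h5 : "p" = s;        · subst h5; decide
  by_cases h6 : "paper" = s;    · subst h6; decide
  by_cases h7 : "(sc)issors" = s; · subst h7; decide
  by_cases h8 : "sc" = s;       · subst h8; decide
  by_cases h9 : "scissors" = s; · subst h9; decide
  by_cases h10 : "(sp)ock" = s; · subst h10; decide
  by_cases h11 : "sp" = s;      · subst h11; decide
  by_cases h12 : "spock" = s;   · subst h12; decide
  by_cases h13 : "(l)izard" = s; · subst h13; decide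
  by_cases h14 : "l" = s;       · subst h14; decide
  by_cases h15 : "lizard" = s;  · subst h15; decide
  simp [map_player_choice, map_player_choice_alt, validChoices, reverseTable,
    PySem.Dict.insert, PySem.Dict.empty, PySem.Dict.get?, PySem.Dict.ofList, PySem.Dict.update, PySem.Dict.contains, h1, h2, h3, h4, h5, h6, h7, h8, h9, h10, h11, h12, h13, h14, h15]

-- ===== VERDICT (by name: the statement is the Claim_ definition above) =====
theorem map_player_choice_spec : Claim_equal_map_player_choice := by
  intro s _
  exact map_player_choice_eq_alt s
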